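-- pv_equiv track=rewrite | github.com/PushkarPrabhath27/ResearchCrossPollinationEngine | hypothesis-engine/src/agents/primary_domain_agent.py | _extract_papers_from_response
-- ===== SOURCE A (Python) =====
-- from typing import List, Dict, Optional
--
-- def _extract_papers_from_response(response: str) -> List[Dict]:
--     """
--     Extract paper information from LLM response
--
--     Args:
--         response: LLM response with paper information
--
--     Returns:
--         List of paper dictionaries
--     """
--     # Simple extraction - in practice, this would parse structured output
--     papers = []
--
--     # Look for paper-like patterns (title, authors, year)
--     # This is a simplified version
--     lines = response.split('\n')
--     current_paper = {}
--
--     for line in lines: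
--         line = line.strip()
--         if not line:
--             if current_paper:
--                 papers.append(current_paper)
--                 current_paper = {}
--             continue
--
--         # Look for title indicators
--         if line.startswith(('Title:', '**', '##')):
--             current_paper['title'] = line.split(':', 1)[-1].strip()
--         elif 'approach:' in line.lower():
--             current_paper['approach'] = line.split(':', 1)[-1].strip()
--         elif 'limitation' in line.lower():
--             current_paper['limitations'] = line.split(':', 1)[-1].strip()
--
--     if current_paper:
--         papers.append(current_paper)
--
--     return papers[:20]  # Limit results
-- ===== SOURCE B (Python) =====
-- from typing import List, Dict
--
--
-- def _parse_block(block: List[str]) -> Dict: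
--     """Build a paper dict from one run of non-empty stripped lines."""
--     paper = {}
--     for line in block:
--         if line.startswith(('Title:', '**', '##')):
--             paper['title'] = line.split(':', 1)[-1].strip()
--         elif 'approach:' in line.lower():
--             paper['approach'] = line.split(':', 1)[-1].strip()
--         elif 'limitation' in line.lower():
--             paper['limitations'] = line.split(':', 1)[-1].strip()
--     return paper
--
--
-- def _extract_papers_from_response(response: str) -> List[Dict]:
--     # Two-level pass: first group stripped lines into maximal runs of
--     # non-empty lines, parsing each run independently; keep non-empty dicts.
--     lines = [raw.strip() for raw in response.split('\n')]
--     n = len(lines)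
--     papers = []
--     i = 0
--     while i < n:
--         if not lines[i]:
--             i += 1
--             continue
--         j = i
--         while j < n and lines[j]:
--             j += 1
--         paper = _parse_block(lines[i:j])
--         if paper:
--             papers.append(paper)
--         i = j
--     return papers[:20]
-- ===== Notes on version B (the rewrite author's own statement) =====
-- stated objective: simpler
-- what changed: Replaces A's flush-on-blank state machine (a mutable current_paper dict flushed into papers whenever a blank line or end of input is seen) with a two-level pass: first group the stripped lines into maximal runs of non-empty lines, then parse each run independently with a _parse_block helper, keeping non-empty dicts and capping at 20.
import Mathlib
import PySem

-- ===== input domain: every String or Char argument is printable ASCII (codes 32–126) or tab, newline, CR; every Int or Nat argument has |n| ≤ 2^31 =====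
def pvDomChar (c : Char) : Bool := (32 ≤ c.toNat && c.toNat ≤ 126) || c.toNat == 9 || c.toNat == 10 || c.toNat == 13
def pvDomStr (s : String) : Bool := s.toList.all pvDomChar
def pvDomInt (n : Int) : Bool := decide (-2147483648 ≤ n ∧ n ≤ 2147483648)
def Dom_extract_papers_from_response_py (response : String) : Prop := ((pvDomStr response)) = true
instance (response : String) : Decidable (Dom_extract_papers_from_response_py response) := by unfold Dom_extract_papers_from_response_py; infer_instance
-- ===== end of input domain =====

-- B replaces A's flush-on-blank state machine by a two-level pass (group stripped lines
-- into maximal non-empty runs, then parse each run independently); objective: simpler.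

-- ===== PORT A =====
-- line.split(':', 1)[-1].strip()
def pvValA (line : String) : String :=
  PySem.Str.strip (((PySem.Str.splitMax? line ":" 1).getD []).getLastD "")

-- the if/elif/elif classification over one (already stripped, non-empty) line
def pvClassA (cur : PySem.Dict String String) (line : String) : PySem.Dict String String :=
  if PySem.Str.startswith line "Title:" || PySem.Str.startswith line "**" ||
      PySem.Str.startswith line "##" then
    cur.insert "title" (pvValA line)
  else if PySem.Str.isIn "approach:" (PySem.Str.lower line) then
    cur.insert "approach" (pvValA line)
  else if PySem.Str.isIn "limitation" (PySem.Str.lower line) then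
    cur.insert "limitations" (pvValA line)
  else cur

-- one iteration of A's for-loop; state = (papers, current_paper)
def pvStepA (st : List (PySem.Dict String String) × PySem.Dict String String) (raw : String) :
    List (PySem.Dict String String) × PySem.Dict String String :=
  let line := PySem.Str.strip raw
  if line = "" then
    if st.2.items = [] then st else (st.1 ++ [st.2], PySem.Dict.empty)
  else (st.1, pvClassA st.2 line)

def extract_papers_from_response_py (response : String) : List (List (String × String)) :=
  let lines := (PySem.Str.split? response "\n").getD []
  let st := lines.foldl pvStepA ([], PySem.Dict.empty)
  let papers := if st.2.items = [] then st.1 else st.1 ++ [st.2]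
  (papers.take 20).map (fun d => d.items)

-- ===== PORT B =====
def pvValB (line : String) : String :=
  PySem.Str.strip (((PySem.Str.splitMax? line ":" 1).getD []).getLastD "")

def pvClassB (paper : PySem.Dict String String) (line : String) : PySem.Dict String String :=
  if PySem.Str.startswith line "Title:" || PySem.Str.startswith line "**" ||
      PySem.Str.startswith line "##" then
    paper.insert "title" (pvValB line)
  else if PySem.Str.isIn "approach:" (PySem.Str.lower line) then
    paper.insert "approach" (pvValB line)
  else if PySem.Str.isIn "limitation" (PySem.Str.lower line) then
    paper.insert "limitations" (pvValB line)
  else paper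

-- B's _parse_block
def pvParseBlock (block : List String) : PySem.Dict String String :=
  block.foldl pvClassB PySem.Dict.empty

-- B's outer while-loop: skip a blank line, or consume one maximal non-empty run,
-- parse it, and keep the dict if non-empty (structural recursion on the line list)
def pvGroupParse : List String → List (PySem.Dict String String)
  | [] => []
  | l :: rest =>
    if l = "" then pvGroupParse rest
    else
      let paper := pvParseBlock (l :: rest.takeWhile (fun s => s ≠ ""))
      let tail := pvGroupParse (rest.dropWhile (fun s => s ≠ ""))
      if paper.items = [] then tail else paper :: tail
termination_by l => l.length
decreasing_by
  · simp
  · have := List.length_dropWhile_le (fun s => decide (s ≠ "")) rest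
    simp at this ⊢; omega

def extract_papers_from_response_py_alt (response : String) : List (List (String × String)) :=
  let lines := ((PySem.Str.split? response "\n").getD []).map PySem.Str.strip
  ((pvGroupParse lines).take 20).map (fun d => d.items)

-- ===== PRECONDITION & SPEC =====
def Spec_extract_papers_from_response_py (response : String) (out : List (List (String × String))) : Prop := out = extract_papers_from_response_py_alt response
instance (response : String) (out : List (List (String × String))) : Decidable (Spec_extract_papers_from_response_py response out) := by unfold Spec_extract_papers_from_response_py; infer_instance

-- ===== CLAIM (what is proved, stated in full; the proofs are below) =====
def Claim_equal_extract_papers_from_response_py : Prop := ∀ (response : String), Dom_extract_papers_from_response_py response → Spec_extract_papers_from_response_py response (extract_papers_from_response_py response)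

-- ===== LEMMAS AND PROOFS =====
-- what A's loop produces from current paper `cur` on the remaining (stripped) lines
def pvCanon : PySem.Dict String String → List String → List (PySem.Dict String String)
  | cur, [] => if cur.items = [] then [] else [cur]
  | cur, l :: rest =>
    if l = "" then (if cur.items = [] then [] else [cur]) ++ pvCanon PySem.Dict.empty rest
    else pvCanon (pvClassA cur l) rest

theorem pvClass_eq : pvClassB = pvClassA := rfl

theorem pvDict_empty_of_items_nil (d : PySem.Dict String String) (h : d.items = []) :
    d = PySem.Dict.empty := by
  apply PySem.Dict.ext; simp [h, PySem.Dict.empty]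

-- A's fold, started at (papers, cur), flushes to papers ++ pvCanon cur (stripped lines)
theorem pvFoldA_eq_canon (lines : List String)
    (papers : List (PySem.Dict String String)) (cur : PySem.Dict String String) :
    (let st := lines.foldl pvStepA (papers, cur);
     if st.2.items = [] then st.1 else st.1 ++ [st.2]) =
      papers ++ pvCanon cur (lines.map PySem.Str.strip) := by
  induction lines generalizing papers cur with
  | nil => simp only [List.foldl_nil, List.map_nil, pvCanon]; split <;> simp
  | cons l rest ih =>
    simp only [List.foldl_cons, List.map_cons]
    by_cases h : PySem.Str.strip l = ""
    · rw [show pvCanon cur (PySem.Str.strip l :: rest.map PySem.Str.strip) =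
          (if cur.items = [] then [] else [cur]) ++
            pvCanon PySem.Dict.empty (rest.map PySem.Str.strip) by rw [h]; rfl]
      by_cases hc : cur.items = []
      · rw [show pvStepA (papers, cur) l = (papers, cur) by simp [pvStepA, h, hc]]
        rw [ih, pvDict_empty_of_items_nil cur hc]
        simp [show PySem.Dict.empty.items = ([] : List (String × String)) from rfl]
      · rw [show pvStepA (papers, cur) l = (papers ++ [cur], PySem.Dict.empty) by
            simp [pvStepA, h, hc]]
        rw [ih]; simp [hc]
    · rw [show pvStepA (papers, cur) l = (papers, pvClassA cur (PySem.Str.strip l)) by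
          simp [pvStepA, h]]
      rw [ih]
      congr 1
      conv_rhs => rw [pvCanon]
      rw [if_neg h]

-- one unfolding of pvGroupParse valid for every shape of the list
theorem pvGroupParse_unfold (t : List String) :
    pvGroupParse t =
      (let d := (t.takeWhile (fun s => s ≠ "")).foldl pvClassA PySem.Dict.empty;
       (if d.items = [] then [] else [d]) ++
         pvGroupParse (t.dropWhile (fun s => s ≠ ""))) := by
  match t with
  | [] => simp [pvGroupParse, PySem.Dict.empty]
  | l :: rest =>
    by_cases h : l = ""
    · subst h
      have e : pvGroupParse ("" :: rest) = pvGroupParse rest := by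
        rw [pvGroupParse]; simp
      rw [List.takeWhile_cons_of_neg (by simp), List.dropWhile_cons_of_neg (by simp), e]
      simp [show PySem.Dict.empty.items = ([] : List (String × String)) from rfl]
    · rw [pvGroupParse]
      rw [if_neg h, List.takeWhile_cons_of_pos (by simp [h]),
          List.dropWhile_cons_of_pos (by simp [h])]
      simp only [pvParseBlock, pvClass_eq, List.foldl_cons]
      split <;> simp

-- the bridge: A's canonical result equals B's group-then-parse result
theorem pvCanon_eq_groupParse (n : Nat) (rest : List String) (hn : rest.length ≤ n)
    (cur : PySem.Dict String String) :
    pvCanon cur rest =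
      (let d := (rest.takeWhile (fun s => s ≠ "")).foldl pvClassA cur;
       (if d.items = [] then [] else [d]) ++
         pvGroupParse (rest.dropWhile (fun s => s ≠ ""))) := by
  induction n generalizing rest cur with
  | zero =>
    have : rest = [] := List.eq_nil_of_length_eq_zero (Nat.le_zero.mp hn)
    subst this
    simp only [pvCanon, List.takeWhile_nil, List.foldl_nil, List.dropWhile_nil, pvGroupParse]
    split <;> simp
  | succ m ih =>
    match rest with
    | [] =>
      simp only [pvCanon, List.takeWhile_nil, List.foldl_nil, List.dropWhile_nil, pvGroupParse]
      split <;> simp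
    | l :: t =>
      have ht : t.length ≤ m := by simp at hn; omega
      by_cases h : l = ""
      · subst h
        rw [show pvCanon cur ("" :: t) =
            (if cur.items = [] then [] else [cur]) ++ pvCanon PySem.Dict.empty t from rfl]
        rw [ih t ht PySem.Dict.empty, ← pvGroupParse_unfold]
        rw [List.takeWhile_cons_of_neg (by simp), List.dropWhile_cons_of_neg (by simp)]
        rw [show pvGroupParse ("" :: t) = pvGroupParse t from by rw [pvGroupParse]; simp]
        simp
      · rw [show pvCanon cur (l :: t) = pvCanon (pvClassA cur l) t from by
            conv_lhs => rw [pvCanon]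
            rw [if_neg h]]
        rw [ih t ht (pvClassA cur l)]
        rw [List.takeWhile_cons_of_pos (by simp [h]),
            List.dropWhile_cons_of_pos (by simp [h])]
        simp

-- ===== VERDICT (by name: the statement is the Claim_ definition above) =====
theorem extract_papers_from_response_py_spec : Claim_equal_extract_papers_from_response_py := by
  intro response _
  unfold Spec_extract_papers_from_response_py
  simp only [extract_papers_from_response_py, extract_papers_from_response_py_alt]
  have h := pvFoldA_eq_canon ((PySem.Str.split? response "\n").getD []) [] PySem.Dict.empty
  simp only [List.nil_append] at h
  rw [h]
  congr 2
  set L := ((PySem.Str.split? response "\n").getD []).map PySem.Str.strip with hL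
  rw [pvCanon_eq_groupParse L.length L le_rfl PySem.Dict.empty, ← pvGroupParse_unfold]
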